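-- pv_equiv track=rewrite | github.com/vladimir-frozenfish/2.2-Python-algorithm | graf_kosaraya.py | dfs_returns_strong
-- ===== SOURCE A (Python) =====
-- def dfs_returns_strong(vertex, graph, used, strong=None):
--     """
--     Обход компоненты в грлубину.
--     Возвращает сильную компаненту.
--     """
--     used.add(vertex)
--     strong = strong or set()
--     strong.add(vertex)
--     for neighbor in graph[vertex]:
--         if neighbor not in used:
--             dfs_returns_strong(neighbor, graph, used, strong)
--     return strong
-- ===== SOURCE B (Python) =====
-- def dfs_returns_strong(vertex, graph, used, strong=None):
--     """Iterative DFS with an explicit stack; same result as the recursive version."""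
--     strong = strong or set()
--     used.add(vertex)
--     strong.add(vertex)
--     stack = list(reversed(graph[vertex]))
--     while stack:
--         v = stack.pop()
--         if v in used:
--             continue
--         used.add(v)
--         strong.add(v)
--         stack.extend(reversed(graph[v]))
--     return strong
-- ===== Notes on version B (the rewrite author's own statement) =====
-- stated objective: alternative
-- what changed: The recursive DFS is replaced by an iterative DFS with an explicit stack (pop a vertex, skip if already used, otherwise mark it and push its neighbors), eliminating recursion entirely.
import Mathlib
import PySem

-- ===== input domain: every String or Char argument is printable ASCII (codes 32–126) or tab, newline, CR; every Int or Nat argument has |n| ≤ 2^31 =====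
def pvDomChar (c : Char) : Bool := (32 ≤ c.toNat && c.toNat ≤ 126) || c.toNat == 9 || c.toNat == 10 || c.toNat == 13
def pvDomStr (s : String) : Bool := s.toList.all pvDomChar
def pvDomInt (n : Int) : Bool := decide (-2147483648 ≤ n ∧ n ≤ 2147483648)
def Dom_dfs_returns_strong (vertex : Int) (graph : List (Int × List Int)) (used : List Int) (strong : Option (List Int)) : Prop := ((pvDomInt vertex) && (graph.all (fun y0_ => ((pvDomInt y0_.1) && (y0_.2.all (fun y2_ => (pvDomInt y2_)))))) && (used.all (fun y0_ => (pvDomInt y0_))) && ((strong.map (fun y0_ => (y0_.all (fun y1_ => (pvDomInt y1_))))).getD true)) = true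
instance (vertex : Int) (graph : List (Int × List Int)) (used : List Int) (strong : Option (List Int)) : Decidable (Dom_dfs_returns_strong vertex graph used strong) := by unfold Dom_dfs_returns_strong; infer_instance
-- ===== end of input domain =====

-- B replaces A's recursive DFS by an iterative DFS with an explicit stack (alternative
-- decomposition, same cost). Both Python versions mutate `used` (and a truthy `strong`) in
-- place in the same way; the equivalence proved here is about the return value.


-- `pvUniv` (all ints occurring in the input) is a port-only termination device: every vertex
-- either port ever inspects belongs to it, so the `∈ univ` guards below never fire on a run
-- that mirrors Python. A missing key (Python KeyError, excluded by Pre_) is read as an empty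
-- adjacency list by both ports, identically.
def pvUniv (vertex : Int) (graph : List (Int × List Int)) : List Int :=
  vertex :: graph.flatMap (fun p => p.1 :: p.2)

def pvAdj (graph : List (Int × List Int)) (v : Int) : List Int :=
  (PySem.Dict.get? (PySem.Dict.mk graph) v).getD []

def pvMeasure (univ used : List Int) : Nat := (univ.filter (fun x => decide (x ∉ used))).length

theorem pvFilter_mono (l : List Int) (p q : Int → Bool) (h : ∀ x, p x = true → q x = true) :
    (l.filter p).length ≤ (l.filter q).length := by
  induction l with
  | nil => simp
  | cons a t ih =>
    simp only [List.filter_cons]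
    by_cases hp : p a = true
    · rw [if_pos hp, if_pos (h a hp)]; simpa using ih
    · rw [if_neg hp]
      by_cases hq : q a = true
      · rw [if_pos hq]; simp; omega
      · rw [if_neg hq]; exact ih

theorem pvMeasure_mono (univ s t : List Int) (h : ∀ x ∈ s, x ∈ t) :
    pvMeasure univ t ≤ pvMeasure univ s := by
  apply pvFilter_mono
  intro x hx
  simp only [decide_eq_true_eq] at *
  exact fun hxs => hx (h x hxs)

theorem pvMeasure_add_lt (univ used : List Int) (v : Int) (hu : v ∈ univ) (hv : v ∉ used) :
    pvMeasure univ (PySem.Set.add used v) < pvMeasure univ used := by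
  have hadd : PySem.Set.add used v = used ++ [v] := by
    unfold PySem.Set.add PySem.Set.contains
    rw [if_neg (by simpa using hv)]
  rw [hadd]
  unfold pvMeasure
  induction univ with
  | nil => cases hu
  | cons a t ih =>
    simp only [List.filter_cons]
    by_cases hav : a = v
    · subst hav
      rw [if_neg (by simp), if_pos (by simpa using hv)]
      simp only [List.length_cons]
      apply Nat.lt_succ_of_le
      apply pvFilter_mono
      intro x hx
      simp only [decide_eq_true_eq, List.mem_append, List.mem_singleton] at hx ⊢
      exact fun hxs => hx (Or.inl hxs)
    · have hvt : v ∈ t := by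
        rcases List.mem_cons.mp hu with h | h
        · exact absurd h.symm hav
        · exact h
      by_cases hau : a ∈ used
      · rw [if_neg (by simp [hau]), if_neg (by simpa using hau)]
        exact ih hvt
      · rw [if_pos (by simp [hau, hav]), if_pos (by simpa using hau)]
        simpa using Nat.succ_lt_succ (ih hvt)

-- ===== PORT A =====
-- A's recursion `dfs(v): used.add(v); strong.add(v); for n in graph[v]: if n not in used: dfs(n)`
-- transcribed as recursion over the adjacency list with the recursive body inlined; the
-- subtype invariant (used only grows) is needed only for termination.
def pvLoopA (univ : List Int) (graph : List (Int × List Int)) (adj : List Int)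
    (used strong : List Int) : {p : List Int × List Int // ∀ x ∈ used, x ∈ p.1} :=
  match adj with
  | [] => ⟨(used, strong), fun _ h => h⟩
  | n :: rest =>
    if hmem : n ∈ used then pvLoopA univ graph rest used strong
    else if huniv : n ∈ univ then
      match h2 : pvLoopA univ graph (pvAdj graph n) (PySem.Set.add used n) (PySem.Set.add strong n) with
      | ⟨(u2, s2), hp2⟩ =>
        match h3 : pvLoopA univ graph rest u2 s2 with
        | ⟨(u3, s3), hp3⟩ =>
          ⟨(u3, s3), fun x hx => hp3 x (hp2 x (by
              unfold PySem.Set.add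
              split
              · exact hx
              · simp [hx]))⟩
    else pvLoopA univ graph rest used strong
  termination_by (pvMeasure univ used, adj.length)
  decreasing_by
  · exact Prod.Lex.right _ (by simp)
  · exact Prod.Lex.left _ _ (pvMeasure_add_lt univ used n huniv hmem)
  · apply Prod.Lex.left
    calc pvMeasure univ u2 ≤ pvMeasure univ (PySem.Set.add used n) := pvMeasure_mono _ _ _ hp2
    _ < pvMeasure univ used := pvMeasure_add_lt univ used n huniv hmem
  · exact Prod.Lex.right _ (by simp)

def dfs_returns_strong (vertex : Int) (graph : List (Int × List Int)) (used : List Int) (strong : Option (List Int)) : List Int :=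
  -- used.add(vertex); strong = strong or set(); strong.add(vertex); then the loop
  (pvLoopA (pvUniv vertex graph) graph (pvAdj graph vertex)
    (PySem.Set.add used vertex) (PySem.Set.add (strong.getD []) vertex)).val.2

-- ===== PORT B =====
-- Source B's while loop; the stack is a list with its top (next pop) at the HEAD, so
-- `stack.extend(reversed(graph[v]))` becomes prepending graph[v] in order.
def pvStackB (univ : List Int) (graph : List (Int × List Int)) (stack : List Int)
    (used strong : List Int) : List Int :=
  match stack with
  | [] => strong
  | v :: rest =>
    if hmem : v ∈ used then pvStackB univ graph rest used strong
    else if huniv : v ∈ univ then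
      pvStackB univ graph (pvAdj graph v ++ rest) (PySem.Set.add used v) (PySem.Set.add strong v)
    else pvStackB univ graph rest used strong
  termination_by (pvMeasure univ used, stack.length)
  decreasing_by
  · exact Prod.Lex.right _ (by simp)
  · exact Prod.Lex.left _ _ (pvMeasure_add_lt univ used v huniv hmem)
  · exact Prod.Lex.right _ (by simp)

def dfs_returns_strong_alt (vertex : Int) (graph : List (Int × List Int)) (used : List Int) (strong : Option (List Int)) : List Int :=
  pvStackB (pvUniv vertex graph) graph (pvAdj graph vertex)
    (PySem.Set.add used vertex) (PySem.Set.add (strong.getD []) vertex)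

-- ===== PRECONDITION & SPEC =====
-- `pvVisited` is the reachability closure of the input graph: `vertex` plus everything
-- reachable from it along edges whose target is not in the initial `used` set — a condition
-- on the input graph's shape, computed by a plain fixpoint iteration (|univ| rounds suffice),
-- independent of either port's recursion.
def pvVStep (graph : List (Int × List Int)) (used : List Int) (S : List Int) : List Int :=
  S.foldl (fun acc v =>
    (pvAdj graph v).foldl (fun acc2 n => if n ∈ used ∨ n ∈ acc2 then acc2 else acc2 ++ [n]) acc) S

def pvVisited (vertex : Int) (graph : List (Int × List Int)) (used : List Int) : List Int :=
  (pvUniv vertex graph).foldl (fun S _ => pvVStep graph used S) [vertex]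

-- Pre_ excludes exactly the inputs on which the Python A raises KeyError: some vertex the
-- traversal visits (i.e. vertex itself, or reachable from it avoiding the initial `used`
-- set) has no key in `graph`.
def Pre_dfs_returns_strong (vertex : Int) (graph : List (Int × List Int)) (used : List Int) (strong : Option (List Int)) : Prop :=
  ∀ v ∈ pvVisited vertex graph used, (PySem.Dict.get? (PySem.Dict.mk graph) v).isSome = true
instance (vertex : Int) (graph : List (Int × List Int)) (used : List Int) (strong : Option (List Int)) : Decidable (Pre_dfs_returns_strong vertex graph used strong) := by unfold Pre_dfs_returns_strong; infer_instance

def pvWitness_dfs_returns_strong : Int × (List (Int × List Int)) × List Int × Option (List Int) :=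
  (0, [(0, [1, 2]), (1, [0]), (2, [])], [], none)

def Spec_dfs_returns_strong (vertex : Int) (graph : List (Int × List Int)) (used : List Int) (strong : Option (List Int)) (out : List Int) : Prop := out = dfs_returns_strong_alt vertex graph used strong
instance (vertex : Int) (graph : List (Int × List Int)) (used : List Int) (strong : Option (List Int)) (out : List Int) : Decidable (Spec_dfs_returns_strong vertex graph used strong out) := by unfold Spec_dfs_returns_strong; infer_instance

-- ===== CLAIM (what is proved, stated in full; the proofs are below) =====
def Claim_equal_dfs_returns_strong : Prop := ∀ (vertex : Int) (graph : List (Int × List Int)) (used : List Int) (strong : Option (List Int)), Dom_dfs_returns_strong vertex graph used strong → Pre_dfs_returns_strong vertex graph used strong → Spec_dfs_returns_strong vertex graph used strong (dfs_returns_strong vertex graph used strong)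

-- ===== LEMMAS AND PROOFS =====

-- the stack machine run on `adj ++ rest` first performs exactly the recursive loop on `adj`,
-- then continues with `rest` from the resulting state
theorem pvStackB_nil (univ : List Int) (graph : List (Int × List Int)) (used strong : List Int) :
    pvStackB univ graph [] used strong = strong := by
  unfold pvStackB
  rfl

theorem pvStackB_cons (univ : List Int) (graph : List (Int × List Int)) (v : Int)
    (rest used strong : List Int) :
    pvStackB univ graph (v :: rest) used strong =
      if v ∈ used then pvStackB univ graph rest used strong
      else if v ∈ univ then
        pvStackB univ graph (pvAdj graph v ++ rest) (PySem.Set.add used v) (PySem.Set.add strong v)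
      else pvStackB univ graph rest used strong := by
  rw [pvStackB.eq_def]
  split
  · simp_all
  · rename_i v' rest' h1
    injection h1 with hv hr
    subst hv; subst hr
    by_cases h : v ∈ used
    · rw [dif_pos h, if_pos h]
    · rw [dif_neg h, if_neg h]
      by_cases h2 : v ∈ univ
      · rw [dif_pos h2, if_pos h2]
      · rw [dif_neg h2, if_neg h2]

theorem pvKey (univ : List Int) (graph : List (Int × List Int)) (adj : List Int)
    (used strong : List Int) : ∀ rest : List Int,
    pvStackB univ graph (adj ++ rest) used strong =
      pvStackB univ graph rest (pvLoopA univ graph adj used strong).val.1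
        (pvLoopA univ graph adj used strong).val.2 := by
  fun_induction pvLoopA univ graph adj used strong with
  | case1 => intro rest; simp
  | case2 used strong n rest' hmem ih =>
    intro rest
    rw [List.cons_append, pvStackB_cons, if_pos hmem]
    exact ih rest
  | case3 used strong n rest' hmem huniv u2 s2 hp2 h2 u3 s3 hp3 h3 ih2 ih1 =>
    intro rest
    rw [List.cons_append, pvStackB_cons, if_neg hmem, if_pos huniv, ih2, h2, ih1, h3]
  | case4 used strong n rest' hmem huniv ih =>
    intro rest
    rw [List.cons_append, pvStackB_cons, if_neg hmem, if_neg huniv]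
    exact ih rest

-- ===== VERDICT (by name: the statement is the Claim_ definition above) =====
theorem dfs_returns_strong_spec : Claim_equal_dfs_returns_strong := by
  intro vertex graph used strong _ _
  unfold Spec_dfs_returns_strong dfs_returns_strong dfs_returns_strong_alt
  have h := pvKey (pvUniv vertex graph) graph (pvAdj graph vertex)
    (PySem.Set.add used vertex) (PySem.Set.add (strong.getD []) vertex) []
  simp only [List.append_nil, pvStackB_nil] at h
  rw [h]
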